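-- pv_equiv track=rewrite | github.com/avnikonenko/hpc-stats-scripts | src/hpc_scripts/pbs_bulk_user_stats.py | split_qstat_f_blocks
-- ===== SOURCE A (Python) =====
-- from typing import Optional, Dict, Any, List
--
-- def split_qstat_f_blocks(blob: str) -> List[str]:
--     """Split a single 'qstat -f ...' response into per-job blocks."""
--     lines = blob.splitlines()
--     idxs = [i for i, ln in enumerate(lines) if ln.strip().startswith("Job Id:")]
--     blocks = []
--     for i, start in enumerate(idxs):
--         end = idxs[i+1] if i+1 < len(idxs) else len(lines)
--         blocks.append("\n".join(lines[start:end]))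
--     return blocks
-- ===== SOURCE B (Python) =====
-- from typing import List
--
-- def split_qstat_f_blocks(blob: str) -> List[str]:
--     """Split a single 'qstat -f ...' response into per-job blocks (single pass)."""
--     blocks: List[str] = []
--     cur = None
--     for ln in blob.splitlines():
--         if ln.strip().startswith("Job Id:"):
--             if cur is not None:
--                 blocks.append("\n".join(cur))
--             cur = [ln]
--         elif cur is not None:
--             cur.append(ln)
--     if cur is not None:
--         blocks.append("\n".join(cur))
--     return blocks
-- ===== Notes on version B (the rewrite author's own statement) =====
-- stated objective: simpler
-- what changed: Replaces the two-phase collect-header-indices-then-slice approach with a single accumulating pass that flushes the current block whenever a new 'Job Id:' header line is seen.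
import Mathlib
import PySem

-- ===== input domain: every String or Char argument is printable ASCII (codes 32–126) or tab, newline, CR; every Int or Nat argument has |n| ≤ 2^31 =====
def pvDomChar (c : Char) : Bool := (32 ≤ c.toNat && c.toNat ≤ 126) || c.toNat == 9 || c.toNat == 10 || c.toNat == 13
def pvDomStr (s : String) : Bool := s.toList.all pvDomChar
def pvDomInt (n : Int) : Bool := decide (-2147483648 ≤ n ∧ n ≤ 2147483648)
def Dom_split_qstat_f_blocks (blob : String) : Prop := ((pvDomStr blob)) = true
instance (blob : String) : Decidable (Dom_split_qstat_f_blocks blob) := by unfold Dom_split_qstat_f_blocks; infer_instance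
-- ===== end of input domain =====

-- B replaces A's two-phase collect-header-indices-then-slice algorithm with a single
-- accumulating pass that flushes the current block at each 'Job Id:' header (objective: simpler).

-- shared header test: ln.strip().startswith("Job Id:")
def pvHdr (ln : String) : Bool := PySem.Str.startswith (PySem.Str.strip ln) "Job Id:"

-- ===== PORT A =====
def split_qstat_f_blocks (blob : String) : List String :=
  let lines := PySem.Str.splitlines blob
  let idxs : List Int :=
    (PySem.List.enumerate lines 0).filterMap (fun q => if pvHdr q.2 then some q.1 else none)
  (PySem.List.enumerate idxs 0).foldl
    (fun blocks q =>
      let e : Int :=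
        if q.1 + 1 < (idxs.length : Int) then PySem.List.pyGetD idxs (q.1 + 1) (lines.length : Int)
        else (lines.length : Int)
      blocks ++ [PySem.Str.join "\n" (PySem.List.slice lines (some q.2) (some e))]) []

-- ===== PORT B =====
-- loop body of B: state = (finished blocks, current block or none)
def pvStepB (st : List String × Option (List String)) (ln : String) :
    List String × Option (List String) :=
  if pvHdr ln then
    (match st.2 with
     | some cur => st.1 ++ [PySem.Str.join "\n" cur]
     | none => st.1, some [ln])
  else
    match st.2 with
    | some cur => (st.1, some (cur ++ [ln]))
    | none => st

-- final flush of B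
def pvFlushB (st : List String × Option (List String)) : List String :=
  match st.2 with
  | some cur => st.1 ++ [PySem.Str.join "\n" cur]
  | none => st.1

def split_qstat_f_blocks_alt (blob : String) : List String :=
  pvFlushB ((PySem.Str.splitlines blob).foldl pvStepB ([], none))

-- ===== PRECONDITION & SPEC =====
def Spec_split_qstat_f_blocks (blob : String) (out : List String) : Prop := out = split_qstat_f_blocks_alt blob
instance (blob : String) (out : List String) : Decidable (Spec_split_qstat_f_blocks blob out) := by unfold Spec_split_qstat_f_blocks; infer_instance

-- ===== CLAIM (what is proved, stated in full; the proofs are below) =====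
def Claim_equal_split_qstat_f_blocks : Prop := ∀ (blob : String), Dom_split_qstat_f_blocks blob → Spec_split_qstat_f_blocks blob (split_qstat_f_blocks blob)

-- ===== LEMMAS AND PROOFS =====

-- reference spec: recursive block splitting
def pvBlocksOf : List String → List String
  | [] => []
  | l :: ls =>
    if pvHdr l then
      PySem.Str.join "\n" (l :: ls.takeWhile (fun x => !pvHdr x)) ::
        pvBlocksOf (ls.dropWhile (fun x => !pvHdr x))
    else pvBlocksOf ls
termination_by ls => ls.length
decreasing_by
  · have := List.length_dropWhile_le (fun x => !pvHdr x) ls; simpa using Nat.lt_succ_of_le this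
  · simp

-- header positions (as naturals)
def pvJ : List String → List Nat
  | [] => []
  | l :: ls => if pvHdr l then 0 :: (pvJ ls).map (· + 1) else (pvJ ls).map (· + 1)

-- A's slicing loop, rephrased on naturals
def pvPairs (lines : List String) : List Nat → List String
  | [] => []
  | [j] => [PySem.Str.join "\n" (lines.drop j)]
  | j :: k :: rest =>
      PySem.Str.join "\n" ((lines.drop j).take (k - j)) :: pvPairs lines (k :: rest)

lemma pvIdxs_eq (ls : List String) : ∀ s : Int,
    (PySem.List.enumerate ls s).filterMap (fun q => if pvHdr q.2 then some q.1 else none)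
      = (pvJ ls).map (fun n : Nat => s + (n : Int)) := by
  induction ls with
  | nil => intro s; simp [pvJ, PySem.List.enumerate_nil]
  | cons l ls ih =>
    intro s
    rw [PySem.List.enumerate_cons, List.filterMap_cons]
    by_cases h : pvHdr l
    · rw [show pvJ (l :: ls) = 0 :: (pvJ ls).map (· + 1) from by simp [pvJ, h]]
      simp only [h, if_true]
      rw [ih (s + 1), List.map_cons, List.map_map]
      refine congrArg₂ _ (by simp) ?_
      exact List.map_congr_left (fun n _ => by simp [Function.comp]; ring)
    · rw [show pvJ (l :: ls) = (pvJ ls).map (· + 1) from by simp [pvJ, h]]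
      simp only [h, if_false, Bool.false_eq_true]
      rw [ih (s + 1), List.map_map]
      exact List.map_congr_left (fun n _ => by simp [Function.comp]; ring)

lemma pvFoldA_aux (lines : List String) (full : List Nat) :
    ∀ (suf pre : List Nat) (s : Int) (acc : List String), full = pre ++ suf → s = pre.length →
    (PySem.List.enumerate (suf.map (Nat.cast : Nat → Int)) s).foldl
      (fun blocks q =>
        let e : Int :=
          if q.1 + 1 < ((full.map (Nat.cast : Nat → Int)).length : Int) then
            PySem.List.pyGetD (full.map (Nat.cast : Nat → Int)) (q.1 + 1) (lines.length : Int)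
          else (lines.length : Int)
        blocks ++ [PySem.Str.join "\n" (PySem.List.slice lines (some q.2) (some e))]) acc
    = acc ++ pvPairs lines suf := by
  intro suf
  induction suf with
  | nil => intro pre s acc _ _; simp [pvPairs, PySem.List.enumerate_nil]
  | cons j rest ih =>
    intro pre s acc hfull hs
    rw [List.map_cons, PySem.List.enumerate_cons, List.foldl_cons]
    cases rest with
    | nil =>
      have hcond : ¬ (s + 1 < ((full.map (Nat.cast : Nat → Int)).length : Int)) := by
        rw [hfull, hs]; simp
      simp only [List.map_nil, PySem.List.enumerate_nil, List.foldl_nil, if_neg hcond]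
      rw [show ((lines.length : Int)) = ((lines.length : Nat) : Int) from rfl,
        PySem.List.slice_natCast, pvPairs]
      rw [show lines.length - j = (lines.drop j).length from (List.length_drop ..).symm,
        List.take_length]
    | cons r rest' =>
      have hcond : (s + 1 < ((full.map (Nat.cast : Nat → Int)).length : Int)) := by
        rw [hfull, hs]; simp
      have hget : PySem.List.pyGetD (full.map (Nat.cast : Nat → Int)) (s + 1)
          (lines.length : Int) = (r : Int) := by
        rw [hs, show ((pre.length : Int) + 1) = ((pre.length + 1 : Nat) : Int) from by push_cast; ring,
          PySem.List.pyGetD_natCast, hfull]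
        rw [List.getD_eq_getElem?_getD, List.map_append]
        rw [List.getElem?_append_right (by simp)]
        simp
      simp only [if_pos hcond, hget]
      rw [PySem.List.slice_natCast]
      rw [ih (pre ++ [j]) (s + 1) _ (by simp [hfull]) (by simp [hs])]
      rw [pvPairs]
      simp [List.append_assoc]

lemma pvPairs_shift (l : String) (lines : List String) :
    ∀ js : List Nat, pvPairs (l :: lines) (js.map (· + 1)) = pvPairs lines js := by
  intro js
  induction js with
  | nil => simp [pvPairs]
  | cons j rest ih =>
    cases rest with
    | nil => simp [pvPairs]
    | cons k r =>
      simp only [List.map_cons] at ih ⊢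
      simp [pvPairs, ih, Nat.succ_sub_succ]

lemma pvJ_nil_iff (ls : List String) : pvJ ls = [] ↔ ∀ x ∈ ls, pvHdr x = false := by
  induction ls with
  | nil => simp [pvJ]
  | cons l ls ih =>
    by_cases h : pvHdr l
    · simp [pvJ, h]
    · simp [pvJ, h, ih]

lemma pvJ_head (ls : List String) : ∀ k rest, pvJ ls = k :: rest →
    ls.take k = ls.takeWhile (fun x => !pvHdr x) := by
  induction ls with
  | nil => intro k rest h; simp [pvJ] at h
  | cons l ls ih =>
    intro k rest h
    by_cases hl : pvHdr l
    · simp only [pvJ, hl, if_pos] at h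
      have hk : k = 0 := (List.cons.injEq .. ▸ h).1.symm
      subst hk
      simp [hl]
    · simp only [pvJ, hl, if_neg, Bool.false_eq_true, not_false_iff] at h
      cases hJ : pvJ ls with
      | nil => rw [hJ] at h; simp at h
      | cons k' rest' =>
        rw [hJ] at h
        simp only [List.map_cons] at h
        obtain ⟨hk, _⟩ := List.cons.injEq .. ▸ h
        subst hk
        simp [List.take_succ_cons, hl, ih k' rest' hJ]

lemma pvBlocksOf_dropWhile (ls : List String) :
    pvBlocksOf ls = pvBlocksOf (ls.dropWhile (fun x => !pvHdr x)) := by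
  induction ls with
  | nil => simp
  | cons l ls ih =>
    by_cases h : pvHdr l
    · simp [h]
    · rw [List.dropWhile_cons]
      simp only [h, Bool.not_false, if_pos]
      rw [← ih]
      simp [pvBlocksOf, h]

lemma pvPairs_J : ∀ lines : List String, pvPairs lines (pvJ lines) = pvBlocksOf lines := by
  intro lines
  induction lines with
  | nil => simp [pvJ, pvPairs, pvBlocksOf]
  | cons l ls ih =>
    by_cases h : pvHdr l
    · simp only [pvJ, h, if_pos]
      cases hJ : pvJ ls with
      | nil =>
        have hall := (pvJ_nil_iff ls).1 hJ
        have htw : ls.takeWhile (fun x => !pvHdr x) = ls := by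
          apply List.takeWhile_eq_self_iff.2; intro x hx; simp [hall x hx]
        have hdw : ls.dropWhile (fun x => !pvHdr x) = [] := by
          apply List.dropWhile_eq_nil_iff.2; intro x hx; simp [hall x hx]
        simp [pvPairs, pvBlocksOf, h, htw, hdw]
      | cons k rest =>
        have htake := pvJ_head ls k rest hJ
        rw [List.map_cons]
        show pvPairs (l :: ls) (0 :: (k+1) :: rest.map (· + 1)) = _
        rw [pvPairs]
        have htail : pvPairs (l :: ls) ((k+1) :: rest.map (· + 1)) = pvPairs ls (k :: rest) := by
          have := pvPairs_shift l ls (k :: rest)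
          simpa using this
        rw [htail, ← hJ, ih, pvBlocksOf]
        simp only [h, if_pos]
        congr 1
        · congr 1
          simp [List.take_succ_cons, ← htake]
        · exact pvBlocksOf_dropWhile ls
    · simp only [pvJ, h, if_neg, Bool.false_eq_true, not_false_iff]
      rw [pvPairs_shift, ih]
      simp [pvBlocksOf, h]

lemma pvFoldB_some : ∀ (ls : List String) (acc cur : List String),
    pvFlushB (ls.foldl pvStepB (acc, some cur))
      = acc ++ [PySem.Str.join "\n" (cur ++ ls.takeWhile (fun x => !pvHdr x))]
          ++ pvBlocksOf (ls.dropWhile (fun x => !pvHdr x)) := by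
  intro ls
  induction ls with
  | nil => intro acc cur; simp [pvFlushB, pvBlocksOf]
  | cons l ls ih =>
    intro acc cur
    by_cases h : pvHdr l
    · rw [List.foldl_cons]
      show pvFlushB (ls.foldl pvStepB (pvStepB (acc, some cur) l)) = _
      simp only [pvStepB, h, if_pos]
      rw [ih]
      rw [List.takeWhile_cons, List.dropWhile_cons]
      simp only [h, Bool.not_true, Bool.false_eq_true, if_false]
      simp [pvBlocksOf, h, List.append_assoc]
    · rw [List.foldl_cons]
      show pvFlushB (ls.foldl pvStepB (pvStepB (acc, some cur) l)) = _
      simp only [pvStepB, h, Bool.false_eq_true, if_false]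
      rw [ih]
      rw [List.takeWhile_cons, List.dropWhile_cons]
      simp [h, List.append_assoc]

lemma pvFoldB_none : ∀ (ls : List String) (acc : List String),
    pvFlushB (ls.foldl pvStepB (acc, none)) = acc ++ pvBlocksOf ls := by
  intro ls
  induction ls with
  | nil => intro acc; simp [pvFlushB, pvBlocksOf]
  | cons l ls ih =>
    intro acc
    rw [List.foldl_cons]
    show pvFlushB (ls.foldl pvStepB (pvStepB (acc, none) l)) = _
    by_cases h : pvHdr l
    · simp only [pvStepB, h, if_pos]
      rw [pvFoldB_some]
      simp [pvBlocksOf, h, List.append_assoc]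
    · simp only [pvStepB, h, Bool.false_eq_true, if_false]
      rw [ih]
      simp [pvBlocksOf, h]

-- ===== VERDICT (by name: the statement is the Claim_ definition above) =====
theorem split_qstat_f_blocks_spec : Claim_equal_split_qstat_f_blocks := by
  intro blob _
  show split_qstat_f_blocks blob = split_qstat_f_blocks_alt blob
  have hB : split_qstat_f_blocks_alt blob = pvBlocksOf (PySem.Str.splitlines blob) := by
    unfold split_qstat_f_blocks_alt
    rw [pvFoldB_none, List.nil_append]
  have key : ∀ lines : List String,
      (PySem.List.enumerate
        ((PySem.List.enumerate lines 0).filterMap (fun q => if pvHdr q.2 then some q.1 else none))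
        0).foldl
        (fun blocks q =>
          let e : Int :=
            if q.1 + 1 <
                (((PySem.List.enumerate lines 0).filterMap
                    (fun q => if pvHdr q.2 then some q.1 else none)).length : Int) then
              PySem.List.pyGetD
                ((PySem.List.enumerate lines 0).filterMap
                  (fun q => if pvHdr q.2 then some q.1 else none))
                (q.1 + 1) (lines.length : Int)
            else (lines.length : Int)
          blocks ++ [PySem.Str.join "\n" (PySem.List.slice lines (some q.2) (some e))]) []
      = pvBlocksOf lines := by
    intro lines
    have h0 := pvIdxs_eq lines 0
    simp only [zero_add] at h0
    rw [show (fun n : Nat => (n : Int)) = (Nat.cast : Nat → Int) from rfl] at h0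
    rw [h0, pvFoldA_aux lines (pvJ lines) (pvJ lines) [] 0 [] (by simp) (by simp),
      List.nil_append, pvPairs_J]
  exact (key (PySem.Str.splitlines blob)).trans hB.symm
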